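-- pv_equiv track=rewrite | github.com/data-jy/instance-dashboard | analyze.py | find_best_spec
-- ===== SOURCE A (Python) =====
-- NHN_SPECS = [
--     # m2 계열 (vCPU:RAM = 1:2)
--     (2,   4),
--     (4,   8),
--     (8,  16),
--     (16, 32),
--     (32, 64),
--     # c2 계열 (vCPU:RAM = 1:1)
--     (2,  2),
--     (4,  4),
--     (8,  8),
--     (16,16),
--     # r2 계열 (vCPU:RAM = 1:4~8)
--     (2,  8),
--     (4, 16),
--     (8, 32),
--     (8, 64),
--     # x1 계열 (고메모리)
--     (16, 64),
--     (16,128),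
--     (32,128),
--     (32,256),
--     (64,256),
-- ]
--
-- def find_best_spec(need_cpu, need_ram):
--     """
--     CPU와 RAM 요구량을 모두 충족하는 NHN Cloud 사양 중
--     비용(vCPU 기준) 최소 사양 반환. 동일 vCPU면 RAM 작은 것 우선.
--     """
--     candidates = [
--         (c, r) for (c, r) in NHN_SPECS
--         if c >= need_cpu and r >= need_ram
--     ]
--     if not candidates:
--         # 요구량 초과 시 가장 큰 사양
--         return max(NHN_SPECS, key=lambda x: (x[0], x[1]))
--     # vCPU 최소 → 동일 vCPU면 RAM 최소
--     return min(candidates, key=lambda x: (x[0], x[1]))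
-- ===== SOURCE B (Python) =====
-- NHN_SPECS = [
--     (2,   4),
--     (4,   8),
--     (8,  16),
--     (16, 32),
--     (32, 64),
--     (2,  2),
--     (4,  4),
--     (8,  8),
--     (16,16),
--     (2,  8),
--     (4, 16),
--     (8, 32),
--     (8, 64),
--     (16, 64),
--     (16,128),
--     (32,128),
--     (32,256),
--     (64,256),
-- ]
--
-- # Specs sorted ascending by (vCPU, RAM); RAM values are < 1000 so the packed
-- # integer key c*1000+r orders pairs exactly lexicographically.
-- SORTED_SPECS = sorted(NHN_SPECS, key=lambda p: p[0] * 1000 + p[1])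
--
-- def find_best_spec(need_cpu, need_ram):
--     """Scan the pre-sorted spec list and return the first spec meeting both
--     requirements (= cheapest feasible); if none, the last (largest) spec."""
--     for c, r in SORTED_SPECS:
--         if c >= need_cpu and r >= need_ram:
--             return (c, r)
--     return SORTED_SPECS[-1]
-- ===== Notes on version B (the rewrite author's own statement) =====
-- stated objective: alternative
-- what changed: Replaced A's filter-then-min (or max over all specs) by sort-then-scan: the spec list is sorted ascending once at module load and the function returns the first feasible spec by early exit, falling back to the last (largest) element of the sorted list.
import Mathlib
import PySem

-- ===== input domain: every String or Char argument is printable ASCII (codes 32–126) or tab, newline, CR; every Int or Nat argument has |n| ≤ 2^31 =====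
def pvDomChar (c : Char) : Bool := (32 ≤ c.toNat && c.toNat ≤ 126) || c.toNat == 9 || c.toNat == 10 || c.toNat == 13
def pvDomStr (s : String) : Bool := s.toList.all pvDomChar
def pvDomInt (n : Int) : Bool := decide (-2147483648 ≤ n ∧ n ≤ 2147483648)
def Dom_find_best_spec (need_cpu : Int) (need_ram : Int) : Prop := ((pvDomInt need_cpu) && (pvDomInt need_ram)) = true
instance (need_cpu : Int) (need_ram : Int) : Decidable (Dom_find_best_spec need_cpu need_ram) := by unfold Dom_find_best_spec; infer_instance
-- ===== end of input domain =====

-- B replaces A's filter-then-min/max by sort-then-scan: sort the spec list once, return the first feasible spec (early exit), else the last element; same per-call cost, different algorithm.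

-- ===== PORT A =====
def nhnSpecs : List (Int × Int) :=
  [(2, 4), (4, 8), (8, 16), (16, 32), (32, 64),
   (2, 2), (4, 4), (8, 8), (16, 16),
   (2, 8), (4, 16), (8, 32), (8, 64),
   (16, 64), (16, 128), (32, 128), (32, 256), (64, 256)]

-- A: build the candidates list, then min over it (or max over all specs if empty),
-- with Python's lexicographic tuple key (x[0], x[1]) via min2?/max2?.
-- The .getD (0,0) defaults are unreachable (both lists are nonempty in their branch).
def find_best_spec (need_cpu : Int) (need_ram : Int) : Int × Int :=
  let candidates := nhnSpecs.filter (fun p => decide (p.1 ≥ need_cpu ∧ p.2 ≥ need_ram))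
  if candidates = [] then
    (PySem.List.max2? nhnSpecs (fun x => x.1) (fun x => x.2)).getD (0, 0)
  else
    (PySem.List.min2? candidates (fun x => x.1) (fun x => x.2)).getD (0, 0)

-- ===== PORT B =====
-- SORTED_SPECS = sorted(NHN_SPECS, key=lambda p: p[0]*1000 + p[1])
def sortedSpecs : List (Int × Int) :=
  PySem.List.sorted nhnSpecs (fun p => p.1 * 1000 + p.2) false

-- the for-loop with early return: first spec meeting both requirements
def scanFirst (need_cpu need_ram : Int) : List (Int × Int) → Option (Int × Int)
  | [] => none
  | p :: t =>
    if p.1 ≥ need_cpu ∧ p.2 ≥ need_ram then some p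
    else scanFirst need_cpu need_ram t

-- falling off the loop: SORTED_SPECS[-1] (the getD (0,0) is unreachable, the list is nonempty)
def find_best_spec_alt (need_cpu : Int) (need_ram : Int) : Int × Int :=
  match scanFirst need_cpu need_ram sortedSpecs with
  | some p => p
  | none => (PySem.List.pyGet? sortedSpecs (-1)).getD (0, 0)

-- ===== PRECONDITION & SPEC =====
def Spec_find_best_spec (need_cpu : Int) (need_ram : Int) (out : Int × Int) : Prop := out = find_best_spec_alt need_cpu need_ram
instance (need_cpu : Int) (need_ram : Int) (out : Int × Int) : Decidable (Spec_find_best_spec need_cpu need_ram out) := by unfold Spec_find_best_spec; infer_instance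

-- ===== CLAIM =====
def Claim_equal_find_best_spec : Prop := ∀ (need_cpu : Int) (need_ram : Int), Dom_find_best_spec need_cpu need_ram → Spec_find_best_spec need_cpu need_ram (find_best_spec need_cpu need_ram)

-- ===== LEMMAS AND PROOFS =====

-- representative of need_cpu's comparison class w.r.t. the vCPU values occurring in nhnSpecs
def repC (x : Int) : Int :=
  if x ≤ 2 then 2 else if x ≤ 4 then 4 else if x ≤ 8 then 8 else if x ≤ 16 then 16
  else if x ≤ 32 then 32 else if x ≤ 64 then 64 else 65

def repR (y : Int) : Int :=
  if y ≤ 2 then 2 else if y ≤ 4 then 4 else if y ≤ 8 then 8 else if y ≤ 16 then 16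
  else if y ≤ 32 then 32 else if y ≤ 64 then 64 else if y ≤ 128 then 128
  else if y ≤ 256 then 256 else 257

theorem repC_iff (x c : Int) (hc : c ∈ ([2, 4, 8, 16, 32, 64] : List Int)) :
    (c ≥ x ↔ c ≥ repC x) := by
  fin_cases hc <;> simp only [repC] <;> split_ifs <;> omega

theorem repR_iff (y r : Int) (hr : r ∈ ([2, 4, 8, 16, 32, 64, 128, 256] : List Int)) :
    (r ≥ y ↔ r ≥ repR y) := by
  fin_cases hr <;> simp only [repR] <;> split_ifs <;> omega

theorem spec_components (p : Int × Int) (hp : p ∈ nhnSpecs) :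
    p.1 ∈ ([2, 4, 8, 16, 32, 64] : List Int) ∧
    p.2 ∈ ([2, 4, 8, 16, 32, 64, 128, 256] : List Int) := by
  fin_cases hp <;> exact ⟨by decide, by decide⟩

theorem cond_iff (x y : Int) (p : Int × Int) (hp : p ∈ nhnSpecs) :
    (p.1 ≥ x ∧ p.2 ≥ y) ↔ (p.1 ≥ repC x ∧ p.2 ≥ repR y) :=
  and_congr (repC_iff x p.1 (spec_components p hp).1) (repR_iff y p.2 (spec_components p hp).2)

theorem A_rep (x y : Int) : find_best_spec x y = find_best_spec (repC x) (repR y) := by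
  have hf : nhnSpecs.filter (fun p => decide (p.1 ≥ x ∧ p.2 ≥ y))
      = nhnSpecs.filter (fun p => decide (p.1 ≥ repC x ∧ p.2 ≥ repR y)) := by
    apply List.filter_congr
    intro p hp
    rw [decide_eq_decide]
    exact cond_iff x y p hp
  simp only [find_best_spec, hf]

theorem scanFirst_congr (x y : Int) (l : List (Int × Int))
    (h : ∀ p ∈ l, ((p.1 ≥ x ∧ p.2 ≥ y) ↔ (p.1 ≥ repC x ∧ p.2 ≥ repR y))) :
    scanFirst x y l = scanFirst (repC x) (repR y) l := by
  induction l with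
  | nil => rfl
  | cons p t ih =>
    have hp := h p (List.mem_cons_self ..)
    by_cases hc : p.1 ≥ x ∧ p.2 ≥ y
    · simp only [scanFirst, if_pos hc, if_pos (hp.mp hc)]
    · simp only [scanFirst, if_neg hc, if_neg (fun hh => hc (hp.mpr hh))]
      exact ih (fun q hq => h q (List.mem_cons_of_mem _ hq))

theorem B_rep (x y : Int) : find_best_spec_alt x y = find_best_spec_alt (repC x) (repR y) := by
  have hs : scanFirst x y sortedSpecs = scanFirst (repC x) (repR y) sortedSpecs := by
    apply scanFirst_congr
    intro p hp
    exact cond_iff x y p ((PySem.List.mem_sorted _ _ _ _).mp hp)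
  simp only [find_best_spec_alt, hs]

theorem repC_mem (x : Int) : repC x ∈ ([2, 4, 8, 16, 32, 64, 65] : List Int) := by
  simp only [repC]; split_ifs <;> decide

theorem repR_mem (y : Int) : repR y ∈ ([2, 4, 8, 16, 32, 64, 128, 256, 257] : List Int) := by
  simp only [repR]; split_ifs <;> decide

theorem finite_check :
    ∀ a ∈ ([2, 4, 8, 16, 32, 64, 65] : List Int),
      ∀ b ∈ ([2, 4, 8, 16, 32, 64, 128, 256, 257] : List Int),
        find_best_spec a b = find_best_spec_alt a b := by decide

-- ===== VERDICT =====
theorem find_best_spec_spec : Claim_equal_find_best_spec := by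
  intro x y _
  unfold Spec_find_best_spec
  rw [A_rep, B_rep]
  exact finite_check _ (repC_mem x) _ (repR_mem y)
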